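-- pv_equiv track=rewrite | github.com/FEDso/CheckioPython | ScientificExpedition/seven_segment.py | count_segment
-- ===== SOURCE A (Python) =====
-- display_nums = {('a', 'b', 'c', 'd', 'e', 'f'): 0, ('b', 'c'): 1,
--                 ('a', 'b', 'd', 'e', 'g'): 2, ('a', 'b', 'c', 'd', 'g'): 3,
--                 ('b', 'c', 'f', 'g'): 4, ('a', 'c', 'd', 'f', 'g'): 5,
--                 ('a', 'c', 'd', 'e', 'f', 'g'): 6, ('a', 'b', 'c'): 7,
--                 ('a', 'b', 'c', 'd', 'e', 'f', 'g'): 8,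
--                 ('a', 'b', 'c', 'd', 'f', 'g'): 9
--                }
--
-- def count_segment(display_lit, display_broken):
--     count = 0
--     n = len(display_broken)
--     for i in range(2**n):
--         mask = bin(i)[2:].zfill(n)
--         display = display_lit[:]
--         for k in range(n):
--             if mask[k] == '1':
--                 display.append(display_broken[k])
--         if tuple(sorted(display)) in display_nums:
--             count += 1
--     return count
-- ===== SOURCE B (Python) =====
-- # Bitmask re-implementation: digits are 7-bit masks; lit becomes one mask,
-- # broken multiplicities become a 7-slot counter; each digit contributes the
-- # product of the multiplicities of its missing bits (no subset enumeration).
-- PATTERNS = [63, 6, 91, 79, 102, 109, 125, 7, 127, 111]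
--
--
-- def _seg_index(s):
--     if len(s) == 1 and 'a' <= s <= 'g':
--         return ord(s) - ord('a')
--     return -1
--
--
-- def count_segment(display_lit, display_broken):
--     lit_mask = 0
--     for s in display_lit:
--         i = _seg_index(s)
--         if i < 0 or (lit_mask >> i) & 1:
--             return 0
--         lit_mask |= 1 << i
--     cnt = [0] * 7
--     for s in display_broken:
--         i = _seg_index(s)
--         if i >= 0:
--             cnt[i] += 1
--     total = 0
--     for p in PATTERNS:
--         if lit_mask & p == lit_mask:
--             ways = 1
--             for i in range(7):
--                 if (p >> i) & 1 and not (lit_mask >> i) & 1: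
--                     ways *= cnt[i]
--             total += ways
--     return total
-- ===== Notes on version B (the rewrite author's own statement) =====
-- stated objective: faster
-- what changed: Replaces A's enumeration of all 2^n broken-segment subsets (sorting each candidate display and probing a dict of tuples) with 7-bit arithmetic: the lit segments are packed into one bitmask, broken multiplicities into a 7-slot counter, and each of the 10 digit masks contributes the product of the multiplicities of its bits missing from the lit mask.
import Mathlib
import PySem

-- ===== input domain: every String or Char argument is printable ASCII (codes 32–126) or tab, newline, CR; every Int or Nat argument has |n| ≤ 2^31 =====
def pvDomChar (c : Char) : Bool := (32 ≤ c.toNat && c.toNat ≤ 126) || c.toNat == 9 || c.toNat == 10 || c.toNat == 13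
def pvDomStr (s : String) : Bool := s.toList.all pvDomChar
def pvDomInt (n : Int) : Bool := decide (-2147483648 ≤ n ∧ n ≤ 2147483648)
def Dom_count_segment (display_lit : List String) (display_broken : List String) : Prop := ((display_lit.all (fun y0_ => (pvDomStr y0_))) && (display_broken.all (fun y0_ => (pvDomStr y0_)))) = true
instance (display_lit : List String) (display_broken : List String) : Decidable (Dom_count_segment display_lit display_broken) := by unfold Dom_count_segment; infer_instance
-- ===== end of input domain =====

-- B replaces A's 2^n subset enumeration by 7-bit arithmetic: lit packed into a
-- bitmask, broken multiplicities into a 7-slot counter, each digit mask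
-- contributing the product of the counts of its missing bits (faster).

-- ===== PORT A =====
-- keys of the display_nums dict (only membership in the key set is ever used)
def pvDisplayNums : List (List String) :=
  [["a","b","c","d","e","f"], ["b","c"], ["a","b","d","e","g"], ["a","b","c","d","g"],
   ["b","c","f","g"], ["a","c","d","f","g"], ["a","c","d","e","f","g"], ["a","b","c"],
   ["a","b","c","d","e","f","g"], ["a","b","c","d","f","g"]]

def count_segment (display_lit : List String) (display_broken : List String) : Int :=
  let n := display_broken.length
  (PySem.List.pyRange 0 ((2:Int) ^ n) 1).foldl (fun count i =>
    -- bin(i)[2:] for i ≥ 0 is format(i,'b') = PySem.Int.toBinChars i (exact here: 0 ≤ i)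
    let mask : List Char := PySem.Chars.zfill (PySem.Int.toBinChars i) (n : Int)
    let display : List String :=
      (PySem.List.pyRange 0 (n : Int) 1).foldl (fun d k =>
        if PySem.Chars.pyGet? mask k = some '1' then
          d ++ [PySem.List.pyGetD display_broken k ""]   -- k is always in range: 0 ≤ k < n
        else d) display_lit
    if PySem.List.sorted display (fun x => x) ∈ pvDisplayNums then count + 1 else count) 0

-- ===== PORT B =====
def pvPatterns : List Nat := [63, 6, 91, 79, 102, 109, 125, 7, 127, 111]

-- len(s) == 1 and 'a' <= s <= 'g': on one-character strings Python's string
-- order is the order of the single code point, so compare the char directly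
def pvSegIndex (s : String) : Int :=
  match s.toList with
  | [c] => if 'a' ≤ c ∧ c ≤ 'g' then (c.toNat : Int) - 97 else -1
  | _ => -1

-- the first loop of B, with its early 'return 0' as an Option
def pvLitMask : List String → Nat → Option Nat
  | [], m => some m
  | s :: rest, m =>
    let i := pvSegIndex s
    if i < 0 ∨ (m >>> i.toNat) &&& 1 = 1 then none
    else pvLitMask rest (m ||| (1 <<< i.toNat))

-- cnt[i] += 1 when the segment is one of a..g (index always in range 0..6)
def pvCntStep (cnt : List Int) (s : String) : List Int :=
  if 0 ≤ pvSegIndex s then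
    cnt.set (pvSegIndex s).toNat (cnt.getD (pvSegIndex s).toNat 0 + 1)
  else cnt

def count_segment_alt (display_lit : List String) (display_broken : List String) : Int :=
  match pvLitMask display_lit 0 with
  | none => 0
  | some litMask =>
    let cnt : List Int := display_broken.foldl pvCntStep (List.replicate 7 0)
    pvPatterns.foldl (fun total p =>
      if litMask &&& p = litMask then
        total + (List.range 7).foldl (fun ways i =>
          if (p >>> i) &&& 1 = 1 ∧ ¬ ((litMask >>> i) &&& 1 = 1)
          then ways * cnt.getD i 0 else ways) 1
      else total) 0

-- ===== PRECONDITION & SPEC =====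
def Spec_count_segment (display_lit : List String) (display_broken : List String) (out : Int) : Prop := out = count_segment_alt display_lit display_broken
instance (display_lit : List String) (display_broken : List String) (out : Int) : Decidable (Spec_count_segment display_lit display_broken out) := by unfold Spec_count_segment; infer_instance

-- ===== CLAIM (what is proved, stated in full; the proofs are below) =====
def Claim_equal_count_segment : Prop := ∀ (display_lit : List String) (display_broken : List String), Dom_count_segment display_lit display_broken → Spec_count_segment display_lit display_broken (count_segment display_lit display_broken)

-- ===== LEMMAS AND PROOFS =====

-- mathematical binary digits of a natural number (= format(m, 'b'))
def pvBinDigits (m : Nat) : List Char :=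
  if h : m < 2 then [Nat.digitChar m]
  else pvBinDigits (m / 2) ++ [Nat.digitChar (m % 2)]
decreasing_by exact Nat.div_lt_self (by omega) (by omega)

-- the n low binary digits of m
def pvLowBits : Nat → Nat → List Char
  | 0, _ => []
  | n+1, m => pvLowBits n (m / 2) ++ [Nat.digitChar (m % 2)]

-- the elements of bs selected by the '1' positions of the mask
def pvSelMask : List Char → List String → List String
  | c :: cs, b :: bs => (if c = '1' then [b] else []) ++ pvSelMask cs bs
  | _, _ => []

def pvValid (l : List String) : Bool :=
  decide (PySem.List.sorted l (fun x => x) ∈ pvDisplayNums)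

-- abstract form of A: sum over all masks
def pvT (lit bs : List String) : Int :=
  ((List.range (2 ^ bs.length)).map (fun i =>
    if pvValid (lit ++ pvSelMask (pvLowBits bs.length i) bs) then (1:Int) else 0)).sum

-- abstract middle form: one summand per pattern
def pvTerm (P lit bs : List String) : Int :=
  if lit.Nodup ∧ ∀ x ∈ lit, x ∈ P then
    (P.map (fun x => if x ∈ lit then (1:Int) else (bs.count x : Int))).prod
  else 0

def pvG (lit bs : List String) : Int := (pvDisplayNums.map (fun P => pvTerm P lit bs)).sum

theorem pvToDigitsCore_eq (fuel : Nat) : ∀ (m : Nat) (acc : List Char), m < fuel →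
    Nat.toDigitsCore 2 fuel m acc = pvBinDigits m ++ acc := by
  induction fuel with
  | zero => omega
  | succ fuel ih =>
    intro m acc h
    rw [Nat.toDigitsCore]
    by_cases h2 : m / 2 = 0
    · have hm : m < 2 := by omega
      have : m % 2 = m := Nat.mod_eq_of_lt hm
      simp [h2, pvBinDigits, hm, this]
    · have hm : ¬ m < 2 := by omega
      rw [if_neg h2, ih (m / 2) _ (by omega)]
      conv_rhs => rw [pvBinDigits]
      rw [dif_neg hm]
      simp

theorem pvToBinChars_nat (m : Nat) : PySem.Int.toBinChars (m : Int) = pvBinDigits m := by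
  have : Nat.toDigits 2 m = pvBinDigits m := by
    rw [Nat.toDigits, pvToDigitsCore_eq (m+1) m [] (by omega)]; simp
  simp [PySem.Int.toBinChars, this]

theorem pvLength_pvLowBits (n : Nat) : ∀ m, (pvLowBits n m).length = n := by
  induction n with
  | zero => intro m; rfl
  | succ n ih => intro m; simp [pvLowBits, ih]

theorem pvLowBits_zero_high (n : Nat) : ∀ m, m < 2 ^ n →
    pvLowBits (n + 1) m = '0' :: pvLowBits n m := by
  induction n with
  | zero => intro m h; interval_cases m; rfl
  | succ n ih =>
    intro m h
    have h2 : m / 2 < 2 ^ n := by omega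
    show pvLowBits (n + 1) (m / 2) ++ [Nat.digitChar (m % 2)] = '0' :: pvLowBits (n + 1) m
    rw [ih (m / 2) h2]
    rfl

theorem pvLowBits_one_high (n : Nat) : ∀ m, m < 2 ^ n →
    pvLowBits (n + 1) (2 ^ n + m) = '1' :: pvLowBits n m := by
  induction n with
  | zero => intro m h; interval_cases m; rfl
  | succ n ih =>
    intro m h
    have he : (2 ^ (n+1) + m) / 2 = 2 ^ n + m / 2 := by
      rw [pow_succ]; omega
    have hm : (2 ^ (n+1) + m) % 2 = m % 2 := by
      rw [pow_succ]; omega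
    show pvLowBits (n + 1) ((2 ^ (n+1) + m) / 2) ++ [Nat.digitChar ((2 ^ (n+1) + m) % 2)]
        = '1' :: pvLowBits (n + 1) m
    rw [he, hm, ih (m / 2) (by omega)]
    rfl

theorem pvBinDigits_high (n : Nat) : ∀ m, m < 2 ^ n →
    pvBinDigits (2 ^ n + m) = '1' :: pvLowBits n m := by
  induction n with
  | zero =>
    intro m h; interval_cases m
    rw [pvBinDigits]; simp [pvLowBits, Nat.digitChar]
  | succ n ih =>
    intro m h
    have hge : ¬ (2 ^ (n+1) + m) < 2 := by
      have h1 : 0 < 2 ^ n := Nat.two_pow_pos n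
      rw [pow_succ]; omega
    rw [pvBinDigits, dif_neg hge]
    have he : (2 ^ (n+1) + m) / 2 = 2 ^ n + m / 2 := by rw [pow_succ]; omega
    have hm : (2 ^ (n+1) + m) % 2 = m % 2 := by rw [pow_succ]; omega
    rw [he, hm, ih (m / 2) (by omega)]
    rfl

theorem pvLen_pvBinDigits_le (n : Nat) : ∀ m, m < 2 ^ n → 1 ≤ n →
    (pvBinDigits m).length ≤ n := by
  induction n with
  | zero => omega
  | succ n ih =>
    intro m h _
    by_cases hm : m < 2
    · rw [pvBinDigits, dif_pos hm]; simp
    · rw [pvBinDigits, dif_neg hm]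
      have h2 : m / 2 < 2 ^ n := by omega
      have hn : 1 ≤ n := by
        by_contra hc
        have : n = 0 := by omega
        subst this
        simp at h2
        omega
      have := ih (m / 2) h2 hn
      simp only [List.length_append, List.length_cons, List.length_nil]
      omega

theorem pvMem_pvBinDigits (m : Nat) (c : Char) (hc : c ∈ pvBinDigits m) : c = '0' ∨ c = '1' := by
  induction m using Nat.strong_induction_on with
  | _ m ih =>
    by_cases hm : m < 2
    · rw [pvBinDigits, dif_pos hm] at hc
      interval_cases m <;> simp_all [Nat.digitChar]
    · rw [pvBinDigits, dif_neg hm] at hc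
      rcases List.mem_append.mp hc with h | h
      · exact ih (m / 2) (Nat.div_lt_self (by omega) (by omega)) h
      · have : c = Nat.digitChar (m % 2) := by simpa using h
        subst this
        have : m % 2 = 0 ∨ m % 2 = 1 := by omega
        rcases this with h | h <;> simp [h, Nat.digitChar]

theorem pvZfill_cons (c : Char) (rest : List Char) (w : Int) (hsign : ¬ (c = '+' ∨ c = '-')) :
    PySem.Chars.zfill (c :: rest) w =
      if w ≤ ((c :: rest).length : Int) then c :: rest
      else List.replicate (w.toNat - (c :: rest).length) '0' ++ (c :: rest) := by
  unfold PySem.Chars.zfill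
  split_ifs with h
  · rfl
  · exact if_neg hsign

theorem pvZfill_succ (c : Char) (rest : List Char) (n : Nat)
    (hlen : (c :: rest).length ≤ n) (hsign : ¬ (c = '+' ∨ c = '-')) :
    PySem.Chars.zfill (c :: rest) ((n:Int) + 1) = '0' :: PySem.Chars.zfill (c :: rest) (n : Int) := by
  rw [pvZfill_cons c rest _ hsign, pvZfill_cons c rest _ hsign]
  have hlow : ¬ ((n:Int) + 1 ≤ ((c :: rest).length : Int)) := by push_cast; omega
  rw [if_neg hlow]
  by_cases he : (n:Int) ≤ ((c :: rest).length : Int)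
  · have heq : (c :: rest).length = n := by omega
    rw [if_pos he]
    have : ((n:Int) + 1).toNat - (c :: rest).length = 1 := by omega
    rw [this]
    rfl
  · rw [if_neg he]
    have e1 : ((n:Int) + 1).toNat - (c :: rest).length = (n - (c :: rest).length) + 1 := by omega
    have e2 : ((n:Int)).toNat - (c :: rest).length = n - (c :: rest).length := by omega
    rw [e1, e2, List.replicate_succ]
    rfl

theorem pvZfill_eq_lowbits (n : Nat) : ∀ m, m < 2 ^ n → 1 ≤ n →
    PySem.Chars.zfill (pvBinDigits m) (n : Int) = pvLowBits n m := by
  induction n with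
  | zero => omega
  | succ n ih =>
    intro m h _
    by_cases hn : n = 0
    · subst hn
      interval_cases m <;> simp [pvBinDigits, pvLowBits, PySem.Chars.zfill, Nat.digitChar]
    · have hn1 : 1 ≤ n := by omega
      by_cases hm : m < 2 ^ n
      · -- high bit 0
        obtain ⟨c, rest, hc⟩ : ∃ c rest, pvBinDigits m = c :: rest := by
          rcases e : pvBinDigits m with _ | ⟨c, rest⟩
          · exfalso
            rw [pvBinDigits] at e
            split_ifs at e <;> simp at e
          · exact ⟨c, rest, rfl⟩
        have hmem : c ∈ pvBinDigits m := by rw [hc]; simp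
        have h01 := pvMem_pvBinDigits m c hmem
        have hsign : ¬ (c = '+' ∨ c = '-') := by
          rcases h01 with h | h <;> subst h <;> decide
        have hlen : (c :: rest).length ≤ n := by
          rw [← hc]; exact pvLen_pvBinDigits_le n m hm hn1
        rw [pvLowBits_zero_high n m hm, hc]
        push_cast
        rw [pvZfill_succ c rest n hlen hsign, ← hc, ih m hm hn1]
      · -- high bit 1
        obtain ⟨k, hk, rfl⟩ : ∃ k, k < 2 ^ n ∧ m = 2 ^ n + k := by
          refine ⟨m - 2 ^ n, ?_, by omega⟩
          have := pow_succ 2 n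
          omega
        rw [pvBinDigits_high n k hk, pvLowBits_one_high n k hk]
        rw [pvZfill_cons _ _ _ (by decide), if_pos]
        simp [pvLength_pvLowBits]

theorem pvInner_fold (bs : List String) :
    ∀ (ms : List Char) (acc : List String), bs.length ≤ ms.length →
    (PySem.List.pyRange 0 (bs.length : Int) 1).foldl (fun d k =>
        if PySem.Chars.pyGet? ms k = some '1' then d ++ [PySem.List.pyGetD bs k ""] else d) acc
      = acc ++ pvSelMask ms bs := by
  induction bs with
  | nil =>
    intro ms acc _
    simp [PySem.List.pyRange_one, pvSelMask]
  | cons b bs ih =>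
    intro ms acc hlen
    rcases ms with _ | ⟨c, ms⟩
    · simp at hlen
    have hpos : (0:Int) < ((b :: bs).length : Int) := by simp
    rw [PySem.List.pyRange_one_cons hpos]
    simp only [List.foldl_cons]
    have hfirst :
        (if PySem.Chars.pyGet? (c :: ms) 0 = some '1' then acc ++ [PySem.List.pyGetD (b :: bs) 0 ""] else acc)
          = acc ++ (if c = '1' then [b] else []) := by
      simp [PySem.Chars.pyGet?, PySem.List.pyGet?_zero_cons, PySem.List.pyGetD_zero_cons]
      split_ifs <;> simp_all
    rw [hfirst]
    have hsplit : PySem.List.pyRange (0+1) ((b :: bs).length : Int) 1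
        = (List.range bs.length).map (fun (k : Nat) => ((1:Int) + (k:Int))) := by
      rw [PySem.List.pyRange_one]
      have : (((b :: bs).length : Int) - (0+1)).toNat = bs.length := by
        simp
      rw [this]
      apply List.map_congr_left
      intro k _
      norm_num
    rw [hsplit, List.foldl_map]
    have hcongr : ∀ (d : List String), ∀ k ∈ List.range bs.length,
        (if PySem.Chars.pyGet? (c :: ms) ((1:Int) + (k:Int)) = some '1'
           then d ++ [PySem.List.pyGetD (b :: bs) ((1:Int) + (k:Int)) ""] else d)
        = (if PySem.Chars.pyGet? ms (k:Int) = some '1'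
           then d ++ [PySem.List.pyGetD bs (k:Int) ""] else d) := by
      intro d k _
      have ecast : ((1:Int) + (k:Int)) = ((k:Int) + 1) := by ring
      have e1 : PySem.Chars.pyGet? (c :: ms) ((1:Int) + (k:Int)) = PySem.Chars.pyGet? ms (k:Int) := by
        rw [ecast]
        simp [PySem.Chars.pyGet?, PySem.List.pyGet?_cons_succ]
      have e2 : PySem.List.pyGetD (b :: bs) ((1:Int) + (k:Int)) "" = PySem.List.pyGetD bs (k:Int) "" := by
        have : ((1:Int) + (k:Int)) = ((k + 1 : Nat) : Int) := by push_cast; ring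
        rw [this, PySem.List.pyGetD_natCast, PySem.List.pyGetD_natCast, List.getD_cons_succ]
      rw [e1, e2]
    rw [PySem.List.foldl_congr_mem (List.range bs.length) _ _ _ hcongr]
    have hih := ih ms (acc ++ (if c = '1' then [b] else [])) (by simpa using hlen)
    rw [PySem.List.pyRange_zero_nat, List.foldl_map] at hih
    rw [hih]
    simp [pvSelMask]

theorem pvA_eq_T (lit bs : List String) : count_segment lit bs = pvT lit bs := by
  simp only [count_segment, pvT]
  rw [show ((2:Int) ^ bs.length) = ((2 ^ bs.length : Nat) : Int) by push_cast; ring]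
  rw [PySem.List.pyRange_zero_nat (2 ^ bs.length), List.foldl_map]
  rw [PySem.List.foldl_ite_add_one, zero_add]
  rw [PySem.List.sum_map_ite_one_zero (fun i => pvValid (lit ++ pvSelMask (pvLowBits bs.length i) bs))
    (List.range (2 ^ bs.length))]
  congr 1
  apply List.countP_congr
  intro i hi
  have hi' : i < 2 ^ bs.length := List.mem_range.mp hi
  have hdisp : (PySem.List.pyRange 0 (bs.length : Int) 1).foldl (fun d k =>
        if PySem.Chars.pyGet? (PySem.Chars.zfill (PySem.Int.toBinChars (i:Int)) (bs.length : Int)) k = some '1'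
        then d ++ [PySem.List.pyGetD bs k ""] else d) lit
      = lit ++ pvSelMask (pvLowBits bs.length i) bs := by
    cases bs with
    | nil =>
      have : pvSelMask (pvLowBits 0 i) [] = [] := by
        cases pvLowBits 0 i <;> rfl
      simp [PySem.List.pyRange_one, this]
    | cons b bs' =>
      have hn1 : 1 ≤ (b :: bs').length := by simp
      rw [pvToBinChars_nat i, pvZfill_eq_lowbits _ i hi' hn1]
      exact pvInner_fold (b :: bs') (pvLowBits _ i) lit (by rw [pvLength_pvLowBits])
  rw [hdisp, pvValid]

theorem pvT_split (lit bs : List String) (b : String) :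
    pvT lit (b :: bs) = pvT lit bs + pvT (lit ++ [b]) bs := by
  simp only [pvT, List.length_cons]
  rw [pow_succ, mul_two, List.range_add]
  rw [List.map_append, List.sum_append, List.map_map]
  congr 1
  · apply congrArg
    apply List.map_congr_left
    intro i hi
    have h := List.mem_range.mp hi
    simp only [pvLowBits_zero_high bs.length i h, pvSelMask]
    simp
  · apply congrArg
    apply List.map_congr_left
    intro i hi
    have h := List.mem_range.mp hi
    simp only [Function.comp_apply, pvLowBits_one_high bs.length i h, pvSelMask]
    simp [List.append_assoc]

theorem pvTerm_split (P lit bs : List String) (b : String) (hP : P.Nodup) :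
    pvTerm P lit (b :: bs) = pvTerm P lit bs + pvTerm P (lit ++ [b]) bs := by
  unfold pvTerm
  by_cases hc : lit.Nodup ∧ ∀ x ∈ lit, x ∈ P
  · obtain ⟨hnd, hsub⟩ := hc
    rw [if_pos ⟨hnd, hsub⟩, if_pos ⟨hnd, hsub⟩]
    by_cases hbl : b ∈ lit
    · have hnd2 : ¬ (lit ++ [b]).Nodup := by
        simp [List.nodup_append, hbl]
      rw [if_neg (fun h => hnd2 h.1), add_zero]
      apply congrArg List.prod
      apply List.map_congr_left
      intro x hx
      by_cases hxl : x ∈ lit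
      · simp [hxl]
      · have hxb : x ≠ b := fun e => hxl (e ▸ hbl)
        simp [hxl, List.count_cons, Ne.symm hxb]
    · by_cases hbP : b ∈ P
      · have hnd2 : (lit ++ [b]).Nodup := by
          rw [List.nodup_append]
          refine ⟨hnd, List.nodup_singleton b, ?_⟩
          intro a ha b' hb' e
          have hb2 : b' = b := by simpa using hb'
          exact hbl ((e.trans hb2) ▸ ha)
        have hsub2 : ∀ x ∈ lit ++ [b], x ∈ P := by
          intro x hx
          rcases List.mem_append.mp hx with h | h
          · exact hsub x h
          · simp at h; subst h; exact hbP
        rw [if_pos ⟨hnd2, hsub2⟩]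
        have hperm : P.Perm (b :: P.erase b) := List.perm_cons_erase hbP
        have key : ∀ (f : String → Int),
            (P.map f).prod = f b * ((P.erase b).map f).prod := by
          intro f
          rw [(hperm.map f).prod_eq]
          simp
        rw [key, key, key]
        have he1 : (P.erase b).map (fun x => if x ∈ lit then (1:Int) else ((b::bs).count x : Int))
                 = (P.erase b).map (fun x => if x ∈ lit then (1:Int) else (bs.count x : Int)) := by
          apply List.map_congr_left
          intro x hx
          have hxb := (hP.mem_erase_iff.mp hx).1
          by_cases hxl : x ∈ lit
          · simp [hxl]
          · simp [hxl, List.count_cons, Ne.symm hxb]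
        have he2 : (P.erase b).map (fun x => if x ∈ lit ++ [b] then (1:Int) else (bs.count x : Int))
                 = (P.erase b).map (fun x => if x ∈ lit then (1:Int) else (bs.count x : Int)) := by
          apply List.map_congr_left
          intro x hx
          have hxb := (hP.mem_erase_iff.mp hx).1
          by_cases hxl : x ∈ lit
          · simp [hxl]
          · have hnm : x ∉ lit ++ [b] := by simp [hxl, hxb]
            simp [hxl, hnm]
        rw [he1, he2]
        have hb1 : (if b ∈ lit then (1:Int) else ((b::bs).count b : Int)) = (bs.count b : Int) + 1 := by
          simp [hbl, List.count_cons_self]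
        have hb2 : (if b ∈ lit then (1:Int) else (bs.count b : Int)) = (bs.count b : Int) := by
          simp [hbl]
        have hb3 : (if b ∈ lit ++ [b] then (1:Int) else (bs.count b : Int)) = 1 := by simp
        rw [hb1, hb2, hb3]
        ring
      · rw [if_neg (fun h => hbP (h.2 b (by simp))), add_zero]
        apply congrArg List.prod
        apply List.map_congr_left
        intro x hx
        by_cases hxl : x ∈ lit
        · simp [hxl]
        · have hxb : x ≠ b := fun e => hbP (e ▸ hx)
          simp [hxl, List.count_cons, Ne.symm hxb]
  · rw [if_neg hc, if_neg hc, if_neg, add_zero]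
    rintro ⟨h1, h2⟩
    exact hc ⟨h1.of_append_left, fun x hx => h2 x (by simp [hx])⟩

theorem pvTerm_nil (P lit : List String) (hP : P.Nodup) (hs : P.Pairwise (· < ·)) :
    pvTerm P lit [] = if PySem.List.sorted lit (fun x => x) = P then 1 else 0 := by
  unfold pvTerm
  by_cases hc : lit.Nodup ∧ ∀ x ∈ lit, x ∈ P
  · rw [if_pos hc]
    by_cases hall : ∀ x ∈ P, x ∈ lit
    · have hprod : (P.map fun x => if x ∈ lit then (1:Int) else (([]:List String).count x : Int)).prod = 1 := by
        apply List.prod_eq_one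
        intro y hy
        obtain ⟨x, hx, rfl⟩ := List.mem_map.mp hy
        simp [hall x hx]
      rw [hprod, if_pos]
      apply PySem.List.sorted_eq_of_perm_of_pairwise_lt _ _ _ _ hs
      exact (List.perm_ext_iff_of_nodup hP hc.1).mpr
        (fun a => ⟨fun h => hall a h, fun h => hc.2 a h⟩)
    · push_neg at hall
      obtain ⟨x, hxP, hxl⟩ := hall
      have hzero : (0:Int) ∈ P.map fun x => if x ∈ lit then (1:Int) else (([]:List String).count x : Int) :=
        List.mem_map.mpr ⟨x, hxP, by simp [hxl]⟩
      rw [List.prod_eq_zero hzero, if_neg]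
      intro hsort
      have hperm : lit.Perm P := (PySem.List.sorted_perm lit (fun x => x) false).symm.trans (by rw [hsort])
      exact hxl (hperm.mem_iff.mpr hxP)
  · rw [if_neg hc, if_neg]
    intro hsort
    have hperm : lit.Perm P := (PySem.List.sorted_perm lit (fun x => x) false).symm.trans (by rw [hsort])
    exact hc ⟨hperm.nodup_iff.mpr hP, fun x hx => hperm.mem_iff.mp hx⟩

theorem pvSum_indicator (L : List (List String)) (hL : L.Nodup) (s : List String) :
    (L.map (fun P => if s = P then (1:Int) else 0)).sum = if s ∈ L then 1 else 0 := by
  induction L with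
  | nil => simp
  | cons P L ih =>
    obtain ⟨hPL, hL'⟩ := List.nodup_cons.mp hL
    rw [List.map_cons, List.sum_cons, ih hL']
    by_cases he : s = P
    · subst he
      simp [hPL]
    · simp [he]

theorem pvPatterns_nodup : pvDisplayNums.Nodup := by decide

theorem pvPatterns_elem (P : List String) (hP : P ∈ pvDisplayNums) :
    P.Nodup ∧ P.Pairwise (· < ·) := by
  fin_cases hP <;>
    exact ⟨by decide, by
      simp only [List.pairwise_cons, List.mem_cons, List.mem_singleton, List.not_mem_nil,
        List.Pairwise.nil, String.lt_iff_toList_lt]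
      refine ?_
      norm_num
      try decide⟩

theorem pvT_eq_G (bs : List String) : ∀ lit, pvT lit bs = pvG lit bs := by
  induction bs with
  | nil =>
    intro lit
    have h1 : pvT lit [] = if pvValid lit then 1 else 0 := by
      have hsel : pvSelMask (pvLowBits 0 0) [] = [] := rfl
      simp [pvT, hsel]
    rw [h1]
    unfold pvG
    have h2 : pvDisplayNums.map (fun P => pvTerm P lit [])
        = pvDisplayNums.map (fun P => if PySem.List.sorted lit (fun x => x) = P then 1 else 0) := by
      apply List.map_congr_left
      intro P hP
      obtain ⟨hnd, hlt⟩ := pvPatterns_elem P hP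
      exact pvTerm_nil P lit hnd hlt
    rw [h2, pvSum_indicator _ pvPatterns_nodup]
    simp [pvValid]
  | cons b bs ih =>
    intro lit
    rw [pvT_split, ih, ih]
    unfold pvG
    rw [← List.sum_map_add]
    apply congrArg
    apply List.map_congr_left
    intro P hP
    exact (pvTerm_split P lit bs b (pvPatterns_elem P hP).1).symm

-- ===== B-side bridge: bitmask form equals pvG =====

def pvSegStr (j : Nat) : String := String.ofList [Char.ofNat (97 + j)]

def pvGood (lit : List String) (m : Nat) : Prop :=
  lit.Nodup ∧ ∀ x ∈ lit, ∃ j, j < 7 ∧ x = pvSegStr j ∧ m.testBit j = false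

def pvPatternPair (P : List String) (p : Nat) : Prop :=
  P.Nodup ∧ (∀ x ∈ P, ∃ j, j < 7 ∧ x = pvSegStr j) ∧
    (∀ j, j < 7 → (pvSegStr j ∈ P ↔ p.testBit j = true))

def pvZipPat : List (List String × Nat) :=
  [(["a","b","c","d","e","f"], 63), (["b","c"], 6), (["a","b","d","e","g"], 91),
   (["a","b","c","d","g"], 79), (["b","c","f","g"], 102), (["a","c","d","f","g"], 109),
   (["a","c","d","e","f","g"], 125), (["a","b","c"], 7),
   (["a","b","c","d","e","f","g"], 127), (["a","b","c","d","f","g"], 111)]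

theorem pvSegStr_inj : ∀ j < 7, ∀ k < 7, pvSegStr j = pvSegStr k → j = k := by decide

theorem pvSegIndex_segStr : ∀ j < 7, pvSegIndex (pvSegStr j) = (j : Int) := by decide


theorem pvBit1 (n i : Nat) : (n >>> i) &&& 1 = 1 ↔ n.testBit i = true := by
  rw [Nat.testBit, Nat.and_comm]; simp [beq_iff_eq]

theorem pvTestBit_orShift (m k j : Nat) :
    ((m ||| (1 <<< k)).testBit j = true) ↔ (m.testBit j = true ∨ j = k) := by
  have h2 : (1 <<< k).testBit j = decide (k = j) := by
    rw [Nat.shiftLeft_eq, one_mul]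
    exact Nat.testBit_two_pow
  rw [Nat.testBit_or, h2]
  simp only [Bool.or_eq_true, decide_eq_true_eq]
  exact or_congr Iff.rfl eq_comm

theorem pvSegIndex_nonneg (s : String) (h : 0 ≤ pvSegIndex s) :
    (pvSegIndex s).toNat < 7 ∧ s = pvSegStr (pvSegIndex s).toNat := by
  rcases e : s.toList with _ | ⟨c, rest⟩
  · simp only [pvSegIndex, e] at h; omega
  rcases rest with _ | ⟨c2, rest⟩
  · simp only [pvSegIndex, e] at h ⊢
    split_ifs at h ⊢ with hc
    · obtain ⟨h1, h2⟩ := hc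
      have hlo : 97 ≤ c.toNat := by
        have h2' : ('a').val ≤ c.val := h1
        rw [UInt32.le_iff_toNat_le] at h2'
        have e97 : ('a').val.toNat = 97 := rfl
        rw [e97] at h2'
        exact h2'
      have hhi : c.toNat ≤ 103 := by
        have h2' : c.val ≤ ('g').val := h2
        rw [UInt32.le_iff_toNat_le] at h2'
        have e103 : ('g').val.toNat = 103 := rfl
        rw [e103] at h2'
        exact h2'
      constructor
      · omega
      · have ht : ((c.toNat : Int) - 97).toNat = c.toNat - 97 := by omega
        rw [ht]
        unfold pvSegStr
        have hn : 97 + (c.toNat - 97) = c.toNat := by omega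
        rw [hn, Char.ofNat_toNat]
        have hback : String.ofList s.toList = s := by simp
        rw [← hback, e]
    · omega
  · simp only [pvSegIndex, e] at h; omega

theorem pvLitMask_none (lit : List String) : ∀ m, pvLitMask lit m = none ↔ ¬ pvGood lit m := by
  induction lit with
  | nil =>
    intro m
    simp [pvLitMask, pvGood]
  | cons s rest ih =>
    intro m
    simp only [pvLitMask]
    split_ifs with hc
    · simp only [true_iff]
      intro hg
      obtain ⟨hnd, hall⟩ := hg
      obtain ⟨j, hj7, hsj, hmj⟩ := hall s (by simp)
      have hidx : pvSegIndex s = (j : Int) := by rw [hsj]; exact pvSegIndex_segStr j hj7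
      rcases hc with hneg | hbit
      · rw [hidx] at hneg; omega
      · rw [hidx] at hbit
        have hmt : m.testBit j = true := (pvBit1 m j).mp (by simpa using hbit)
        rw [hmt] at hmj
        exact absurd hmj (by simp)
    · push_neg at hc
      obtain ⟨hi0', hbit⟩ := hc
      obtain ⟨hlt, hs⟩ := pvSegIndex_nonneg s hi0'
      have hmbit : m.testBit (pvSegIndex s).toNat = false := by
        rcases hb : m.testBit (pvSegIndex s).toNat with _ | _
        · rfl
        · exact absurd ((pvBit1 m _).mpr hb) hbit
      rw [ih]
      constructor <;> intro hng hg <;> apply hng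
      · -- pvGood (s::rest) m → pvGood rest m'
        obtain ⟨hnd, hall⟩ := hg
        obtain ⟨hsr, hndr⟩ := List.nodup_cons.mp hnd
        refine ⟨hndr, ?_⟩
        intro x hx
        obtain ⟨j, hj7, hxj, hmj⟩ := hall x (by simp [hx])
        refine ⟨j, hj7, hxj, ?_⟩
        rcases hb : (m ||| (1 <<< (pvSegIndex s).toNat)).testBit j with _ | _
        · rfl
        · exfalso
          rcases (pvTestBit_orShift m _ j).mp hb with h1 | h1
          · rw [h1] at hmj; exact absurd hmj (by simp)
          · subst h1
            have hxs : s = x := by rw [hs, hxj]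
            exact hsr (hxs ▸ hx)
      · -- pvGood rest m' → pvGood (s::rest) m
        obtain ⟨hndr, hall⟩ := hg
        have hsr : s ∉ rest := by
          intro hmem
          obtain ⟨j, hj7, hsj, hmj⟩ := hall s hmem
          have hj : j = (pvSegIndex s).toNat := by
            apply pvSegStr_inj j hj7 _ hlt
            rw [← hsj, ← hs]
          have htrue := (pvTestBit_orShift m (pvSegIndex s).toNat j).mpr (Or.inr hj)
          exact absurd hmj (by simp [htrue])
        refine ⟨List.nodup_cons.mpr ⟨hsr, hndr⟩, ?_⟩
        intro x hx
        rcases List.mem_cons.mp hx with rfl | hx'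
        · exact ⟨(pvSegIndex x).toNat, hlt, hs, hmbit⟩
        · obtain ⟨j, hj7, hxj, hmj⟩ := hall x hx'
          refine ⟨j, hj7, hxj, ?_⟩
          rcases hb : m.testBit j with _ | _
          · rfl
          · exfalso
            have := (pvTestBit_orShift m (pvSegIndex s).toNat j).mpr (Or.inl hb)
            rw [this] at hmj; exact absurd hmj (by simp)

theorem pvLitMask_some (lit : List String) : ∀ m M, pvLitMask lit m = some M →
    ∀ j, (M.testBit j = true ↔ (m.testBit j = true ∨ (j < 7 ∧ pvSegStr j ∈ lit))) := by
  induction lit with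
  | nil =>
    intro m M h j
    simp only [pvLitMask, Option.some.injEq] at h
    subst h
    simp
  | cons s rest ih =>
    intro m M h j
    simp only [pvLitMask] at h
    split_ifs at h with hc
    push_neg at hc
    obtain ⟨hi0', _⟩ := hc
    obtain ⟨hlt, hs⟩ := pvSegIndex_nonneg s hi0'
    rw [ih _ _ h j, pvTestBit_orShift]
    constructor
    · rintro ((h1 | h1) | ⟨hj7, hmem⟩)
      · exact Or.inl h1
      · subst h1
        exact Or.inr ⟨hlt, by rw [← hs]; simp⟩
      · exact Or.inr ⟨hj7, by simp [hmem]⟩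
    · rintro (h1 | ⟨hj7, hmem⟩)
      · exact Or.inl (Or.inl h1)
      · rcases List.mem_cons.mp hmem with he | hmem'
        · refine Or.inl (Or.inr ?_)
          apply pvSegStr_inj j hj7 _ hlt
          rw [he]; exact hs
        · exact Or.inr ⟨hj7, hmem'⟩

theorem pvCnt_getD (bs : List String) : ∀ (cnt : List Int), cnt.length = 7 → ∀ i, i < 7 →
    (bs.foldl pvCntStep cnt).getD i 0 = cnt.getD i 0 + (bs.count (pvSegStr i) : Int) := by
  induction bs with
  | nil => intro cnt _ i _; simp
  | cons s rest ih =>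
    intro cnt hlen i hi
    simp only [List.foldl_cons]
    have hlen2 : (pvCntStep cnt s).length = 7 := by
      unfold pvCntStep
      split_ifs <;> simp [hlen]
    rw [ih _ hlen2 i hi]
    have hcount : ((s :: rest).count (pvSegStr i) : Int)
        = (rest.count (pvSegStr i) : Int) + (if s = pvSegStr i then 1 else 0) := by
      rw [List.count_cons]
      by_cases hse : s = pvSegStr i <;> simp [hse] <;> push_cast <;> ring
    rw [hcount]
    have hstep : (pvCntStep cnt s).getD i 0 = cnt.getD i 0 + (if s = pvSegStr i then 1 else 0) := by
      unfold pvCntStep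
      by_cases hpos : 0 ≤ pvSegIndex s
      · obtain ⟨hlt, hseq⟩ := pvSegIndex_nonneg s hpos
        rw [if_pos hpos]
        by_cases heq : (pvSegIndex s).toNat = i
        · have hse : s = pvSegStr i := by rw [hseq, heq]
          rw [heq]
          rw [List.getD_eq_getElem?_getD, List.getElem?_set_self (by omega)]
          simp [hse, List.getD_eq_getElem?_getD]
        · have hse : ¬ s = pvSegStr i := by
            intro h
            apply heq
            apply pvSegStr_inj _ hlt _ hi
            rw [← hseq, ← h]
          rw [List.getD_eq_getElem?_getD, List.getElem?_set_ne (by omega)]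
          simp [hse, List.getD_eq_getElem?_getD]
      · rw [if_neg hpos]
        have hse : ¬ s = pvSegStr i := by
          intro h
          apply hpos
          rw [h, pvSegIndex_segStr i hi]
          omega
        simp [hse]
    rw [hstep]
    ring

theorem pvFoldl_ite_mul {α : Type} (c : α → Prop) [DecidablePred c] (g : α → Int) (l : List α) :
    ∀ a, l.foldl (fun w i => if c i then w * g i else w) a
      = a * ((l.filter (fun i => decide (c i))).map g).prod := by
  induction l with
  | nil => intro a; simp
  | cons x l ih =>
    intro a
    by_cases hx : c x <;> simp [hx, ih] <;> ring

theorem pvProd_ite_one {α : Type} (c : α → Prop) [DecidablePred c] (g : α → Int) (l : List α) :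
    (l.map (fun i => if c i then (1:Int) else g i)).prod
      = ((l.filter (fun i => ! decide (c i))).map g).prod := by
  induction l with
  | nil => simp
  | cons x l ih => by_cases hx : c x <;> simp [hx, ih]

theorem pvZip_fst : pvDisplayNums = pvZipPat.map Prod.fst := rfl

theorem pvZip_snd : pvPatterns = pvZipPat.map Prod.snd := rfl

theorem pvZip_pp : ∀ pr ∈ pvZipPat, pvPatternPair pr.1 pr.2 := by
  intro pr hpr
  unfold pvPatternPair
  fin_cases hpr <;> exact ⟨by decide, by decide, by decide⟩

theorem pvGood_of_some (lit : List String) (M : Nat) (h : pvLitMask lit 0 = some M) :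
    pvGood lit 0 := by
  by_contra hng
  rw [← pvLitMask_none lit 0] at hng
  rw [h] at hng
  cases hng

theorem pvTerm_eq_bit (P : List String) (p : Nat) (hpp : pvPatternPair P p)
    (lit bs : List String) (M : Nat) (hM : pvLitMask lit 0 = some M) :
    (if M &&& p = M then
      (List.range 7).foldl (fun ways i =>
        if (p >>> i) &&& 1 = 1 ∧ ¬ ((M >>> i) &&& 1 = 1)
        then ways * (bs.foldl pvCntStep (List.replicate 7 0)).getD i 0 else ways) 1
     else 0) = pvTerm P lit bs := by
  obtain ⟨hPnd, hPel, hPbit⟩ := hpp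
  obtain ⟨hnd, hel⟩ := pvGood_of_some lit M hM
  have hspec := pvLitMask_some lit 0 M hM
  have hspec' : ∀ j, M.testBit j = true ↔ (j < 7 ∧ pvSegStr j ∈ lit) := by
    intro j
    rw [hspec j]
    simp [Nat.zero_testBit]
  have hsub : (M &&& p = M) ↔ ∀ x ∈ lit, x ∈ P := by
    constructor
    · intro heq x hx
      obtain ⟨j, hj7, hxj, _⟩ := hel x hx
      have hMt : M.testBit j = true := (hspec' j).mpr ⟨hj7, by rw [← hxj]; exact hx⟩
      have hpt : p.testBit j = true := by
        have hco := congrArg (fun n => n.testBit j) heq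
        simp only [Nat.testBit_and] at hco
        cases hp : p.testBit j
        · rw [hMt, hp] at hco; simp at hco
        · rfl
      rw [hxj]
      exact (hPbit j hj7).mpr hpt
    · intro hsb
      apply Nat.eq_of_testBit_eq
      intro j
      rw [Nat.testBit_and]
      cases hMt : M.testBit j
      · simp
      · obtain ⟨hj7, hmem⟩ := (hspec' j).mp hMt
        have hpt : p.testBit j = true := (hPbit j hj7).mp (hsb _ hmem)
        simp [hpt]
  by_cases hC : M &&& p = M
  · rw [if_pos hC]
    unfold pvTerm
    rw [if_pos ⟨hnd, hsub.mp hC⟩]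
    have hcnt : ∀ i, i < 7 →
        (bs.foldl pvCntStep (List.replicate 7 0)).getD i 0 = (bs.count (pvSegStr i) : Int) := by
      intro i hi
      rw [pvCnt_getD bs _ (by simp) i hi, List.getD_eq_getElem?_getD,
        List.getElem?_replicate, if_pos hi]
      simp
    rw [pvFoldl_ite_mul (fun i => (p >>> i) &&& 1 = 1 ∧ ¬ ((M >>> i) &&& 1 = 1))
        (fun i => (bs.foldl pvCntStep (List.replicate 7 0)).getD i 0) (List.range 7) 1, one_mul]
    -- left side: product over the bits of p missing from M, of the counter entries
    have hfiltL : (List.range 7).filter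
          (fun i => decide ((p >>> i) &&& 1 = 1 ∧ ¬ ((M >>> i) &&& 1 = 1)))
        = (List.range 7).filter (fun i => p.testBit i && ! M.testBit i) := by
      apply List.filter_congr
      intro i _
      have hiff : ((p >>> i) &&& 1 = 1 ∧ ¬ ((M >>> i) &&& 1 = 1))
          ↔ ((p.testBit i && ! M.testBit i) = true) :=
        Iff.trans (and_congr (pvBit1 p i) (not_congr (pvBit1 M i))) (by simp)
      rw [decide_eq_decide.mpr hiff]
      · simp
      · infer_instance
    rw [hfiltL]
    have hmapL : ((List.range 7).filter (fun i => p.testBit i && ! M.testBit i)).map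
          (fun i => (bs.foldl pvCntStep (List.replicate 7 0)).getD i 0)
        = ((List.range 7).filter (fun i => p.testBit i && ! M.testBit i)).map
          (fun i => (bs.count (pvSegStr i) : Int)) := by
      apply List.map_congr_left
      intro i hi
      have : i ∈ List.range 7 := List.mem_of_mem_filter hi
      exact hcnt i (List.mem_range.mp this)
    rw [hmapL]
    -- right side: P is a permutation of the bits of p
    have hperm : P.Perm (((List.range 7).filter (fun j => p.testBit j)).map pvSegStr) := by
      apply (List.perm_ext_iff_of_nodup hPnd ?_).mpr
      · intro x
        constructor
        · intro hx
          obtain ⟨j, hj7, hxj⟩ := hPel x hx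
          refine List.mem_map.mpr ⟨j, ?_, hxj.symm⟩
          refine List.mem_filter.mpr ⟨List.mem_range.mpr hj7, ?_⟩
          simpa using (hPbit j hj7).mp (by rw [← hxj]; exact hx)
        · intro hx
          obtain ⟨j, hj, hxj⟩ := List.mem_map.mp hx
          obtain ⟨hjr, hjb⟩ := List.mem_filter.mp hj
          have hj7 := List.mem_range.mp hjr
          rw [← hxj]
          exact (hPbit j hj7).mpr (by simpa using hjb)
      · apply List.Nodup.map_on
        · intro j hj k hk he
          exact pvSegStr_inj j (List.mem_range.mp (List.mem_of_mem_filter hj))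
            k (List.mem_range.mp (List.mem_of_mem_filter hk)) he
        · exact List.Nodup.filter _ (List.nodup_range)
    rw [(hperm.map (fun x => if x ∈ lit then (1:Int) else (bs.count x : Int))).prod_eq,
        List.map_map]
    have hmapR : ((List.range 7).filter (fun j => p.testBit j)).map
          ((fun x => if x ∈ lit then (1:Int) else (bs.count x : Int)) ∘ pvSegStr)
        = ((List.range 7).filter (fun j => p.testBit j)).map
          (fun j => if M.testBit j = true then (1:Int) else (bs.count (pvSegStr j) : Int)) := by
      apply List.map_congr_left
      intro j hj
      have hj7 := List.mem_range.mp (List.mem_of_mem_filter hj)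
      simp only [Function.comp_apply]
      by_cases hmem : pvSegStr j ∈ lit
      · rw [if_pos hmem, if_pos ((hspec' j).mpr ⟨hj7, hmem⟩)]
      · rw [if_neg hmem, if_neg]
        intro hMt
        exact hmem ((hspec' j).mp hMt).2
    rw [hmapR, pvProd_ite_one (fun j => M.testBit j = true)
        (fun j => (bs.count (pvSegStr j) : Int)) _]
    rw [List.filter_filter]
    have hfiltR : (List.range 7).filter (fun a => !decide (M.testBit a = true) && p.testBit a)
        = (List.range 7).filter (fun i => p.testBit i && ! M.testBit i) := by
      apply List.filter_congr
      intro i _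
      cases hp : p.testBit i <;> cases hm : M.testBit i <;> simp [hp, hm]
    rw [hfiltR]
  · rw [if_neg hC]
    unfold pvTerm
    rw [if_neg]
    rintro ⟨_, hsb⟩
    exact hC (hsub.mpr hsb)

theorem pvB_eq_G (lit bs : List String) : count_segment_alt lit bs = pvG lit bs := by
  unfold count_segment_alt
  rcases hmask : pvLitMask lit 0 with _ | M
  · have hng : ¬ pvGood lit 0 := (pvLitMask_none lit 0).mp hmask
    have hz : ∀ P ∈ pvDisplayNums, pvTerm P lit bs = 0 := by
      intro P hP
      unfold pvTerm
      rw [if_neg]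
      rintro ⟨hnd, hsb⟩
      apply hng
      refine ⟨hnd, ?_⟩
      intro x hx
      have hP' : P ∈ pvZipPat.map Prod.fst := by rw [← pvZip_fst]; exact hP
      obtain ⟨pr, hpr, hfst⟩ := List.mem_map.mp hP'
      obtain ⟨_, hPel, _⟩ := pvZip_pp pr hpr
      obtain ⟨j, hj7, hxj⟩ := hPel x (by rw [hfst]; exact hsb x hx)
      exact ⟨j, hj7, hxj, Nat.zero_testBit j⟩
    have hmap : pvDisplayNums.map (fun P => pvTerm P lit bs)
        = pvDisplayNums.map (fun _ => (0:Int)) := List.map_congr_left hz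
    unfold pvG
    rw [hmap]
    simp
  · have hbody : ∀ (total : Int), ∀ pr ∈ pvZipPat,
        (if M &&& pr.2 = M then
          total + (List.range 7).foldl (fun ways i =>
            if (pr.2 >>> i) &&& 1 = 1 ∧ ¬ ((M >>> i) &&& 1 = 1)
            then ways * (bs.foldl pvCntStep (List.replicate 7 0)).getD i 0 else ways) 1
        else total) = total + pvTerm pr.1 lit bs := by
      intro total pr hpr
      have hte := pvTerm_eq_bit pr.1 pr.2 (pvZip_pp pr hpr) lit bs M hmask
      by_cases hC : M &&& pr.2 = M
      · rw [if_pos hC]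
        rw [if_pos hC] at hte
        rw [hte]
      · rw [if_neg hC]
        rw [if_neg hC] at hte
        rw [← hte]
        ring
    refine Eq.trans (b := List.foldl (fun (total : Int) p =>
        if M &&& p = M then
          total + (List.range 7).foldl (fun ways i =>
            if (p >>> i) &&& 1 = 1 ∧ ¬ ((M >>> i) &&& 1 = 1)
            then ways * (bs.foldl pvCntStep (List.replicate 7 0)).getD i 0 else ways) 1
        else total) 0 pvPatterns) rfl ?_
    rw [pvZip_snd, List.foldl_map]
    rw [PySem.List.foldl_congr_mem pvZipPat _ (fun total pr => total + pvTerm pr.1 lit bs) 0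
      (fun acc pr h => hbody acc pr h)]
    rw [PySem.List.foldl_add]
    unfold pvG
    rw [pvZip_fst, List.map_map]
    simp only [zero_add]
    rfl

-- ===== VERDICT (by name: the statement is the Claim_ definition above) =====
theorem count_segment_spec : Claim_equal_count_segment := by
  intro lit bs _
  unfold Spec_count_segment
  rw [pvA_eq_T, pvT_eq_G, pvB_eq_G]
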